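-- pv_equiv track=rewrite | github.com/MNoichl/workshop_AI_bamberg | utils/openalex_utils.py | _canonicalize_sort_value
-- ===== SOURCE A (Python) =====
-- from typing import Callable, Optional
--
-- def _split_filter_string(filter_string: str) -> list[str]:
--     if not filter_string:
--         return []
--
--     parts: list[str] = []
--     current: list[str] = []
--     quote_char: Optional[str] = None
--
--     for char in filter_string:
--         if char in {"'", '"'}:
--             if quote_char == char:
--                 quote_char = None
--             elif quote_char is None:
--                 quote_char = char
--             current.append(char)
--             continue
--
--         if char == "," and quote_char is None:
--             part = "".join(current).strip()
--             if part:
--                 parts.append(part)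
--             current = []
--             continue
--
--         current.append(char)
--
--     tail = "".join(current).strip()
--     if tail:
--         parts.append(tail)
--     return parts
--
-- def _canonicalize_filter_key(key: str) -> str:
--     key = key.strip()
--     if key.startswith("host_venue."):
--         return key.replace("host_venue.", "primary_location.source.", 1)
--     return key
--
-- def _canonicalize_sort_value(sort_value: str) -> str:
--     items = []
--     for item in _split_filter_string(sort_value):
--         direction = ""
--         field = item
--         if item.startswith("-"):
--             direction = "-"
--             field = item[1:]
--         elif ":" in item:
--             field_name, field_direction = item.split(":", 1)
--             field = field_name
--             direction = f":{field_direction}"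
--
--         field = _canonicalize_filter_key(field)
--         items.append(f"{direction}{field}" if direction.startswith("-") else f"{field}{direction}")
--
--     return ",".join(items)
-- ===== SOURCE B (Python) =====
-- # B: tokenizer that jumps over quoted spans with str.find instead of a per-character
-- # quote-state machine, then per-item direction parsing via str.partition.
--
-- def _take_token(s):
--     # Maximal token prefix of s (ending at the first unquoted comma or at the end);
--     # quoted spans are skipped in one jump with str.find.
--     tok = ""
--     while s and s[0] != ",":
--         if s[0] in "'\"":
--             end = s.find(s[0], 1)
--             cut = len(s) if end == -1 else end + 1
--             tok += s[:cut]
--             s = s[cut:]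
--         else:
--             tok += s[0]
--             s = s[1:]
--     return tok, s
--
--
-- def _fix_field(field):
--     field = field.strip()
--     if field.startswith("host_venue."):
--         return "primary_location.source." + field[len("host_venue."):]
--     return field
--
--
-- def _canonicalize_sort_value(sort_value: str) -> str:
--     items = []
--     rest = sort_value
--     while rest:
--         if rest[0] == ",":
--             rest = rest[1:]
--             continue
--         token, rest = _take_token(rest)
--         item = token.strip()
--         if not item:
--             continue
--         if item.startswith("-"):
--             items.append("-" + _fix_field(item[1:]))
--         else:
--             head, sep, tail = item.partition(":")
--             items.append(_fix_field(head) + sep + tail)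
--     return ",".join(items)
-- ===== Notes on version B (the rewrite author's own statement) =====
-- stated objective: alternative
-- what changed: Replaces A's per-character quote-state-machine splitter (explicit parts/current/quote_char accumulator) with a tokenizer over string suffixes that skips each quoted span in a single str.find jump, and parses the direction suffix with str.partition instead of a membership test followed by a bounded split.
import Mathlib
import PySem

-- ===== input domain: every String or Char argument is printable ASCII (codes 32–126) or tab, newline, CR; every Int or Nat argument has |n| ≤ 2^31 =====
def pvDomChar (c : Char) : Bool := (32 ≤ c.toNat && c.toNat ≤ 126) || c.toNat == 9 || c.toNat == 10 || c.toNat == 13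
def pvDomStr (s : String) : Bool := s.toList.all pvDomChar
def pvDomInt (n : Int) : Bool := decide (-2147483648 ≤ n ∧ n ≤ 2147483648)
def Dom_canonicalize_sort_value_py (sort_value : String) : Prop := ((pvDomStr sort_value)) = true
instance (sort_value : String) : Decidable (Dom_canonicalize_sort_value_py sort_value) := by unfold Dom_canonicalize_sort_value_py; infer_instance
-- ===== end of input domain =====

-- B replaces A's per-character quote-state-machine splitter by a tokenizer that jumps
-- over quoted spans with str.find and parses directions with str.partition (objective:
-- alternative; same return value for every input).

-- ===== PORT A =====

-- str.replace(old, new, 1) for a non-empty `old`, ported by hand (PySem.Chars.replace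
-- replaces all occurrences): exact for non-empty `old` (here "host_venue.").
def aReplace1 (old new : List Char) : List Char → List Char
  | [] => if PySem.Chars.startswith [] old then new ++ ([] : List Char).drop old.length else []
  | c :: r =>
      if PySem.Chars.startswith (c :: r) old then new ++ (c :: r).drop old.length
      else c :: aReplace1 old new r

-- _canonicalize_filter_key
def aCanonKey (key : List Char) : List Char :=
  let k := PySem.Chars.strip key
  if PySem.Chars.startswith k "host_venue.".toList then
    aReplace1 "host_venue.".toList "primary_location.source.".toList k
  else k

-- the for-loop of _split_filter_string: state (parts, current, quote_char)
def aLoop : List (List Char) → List Char → Option Char → List Char → List (List Char)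
  | parts, current, _q, [] =>
      let tail := PySem.Chars.strip current
      if tail ≠ [] then parts ++ [tail] else parts
  | parts, current, q, c :: rest =>
      if c = '\'' ∨ c = '"' then
        aLoop parts (current ++ [c])
          (if q = some c then none else if q = none then some c else q) rest
      else if c = ',' ∧ q = none then
        let part := PySem.Chars.strip current
        aLoop (if part ≠ [] then parts ++ [part] else parts) [] none rest
      else aLoop parts (current ++ [c]) q rest

-- _split_filter_string
def aSplit (s : List Char) : List (List Char) :=
  if s = [] then [] else aLoop [] [] none s

-- body of the for-loop of _canonicalize_sort_value (item[1:] = drop 1; item.split(":", 1)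
-- = PySem.Chars.splitOnMax item [':'] 1)
def aItem (item : List Char) : List Char :=
  let p : List Char × List Char :=
    if PySem.Chars.startswith item ['-'] then (['-'], item.drop 1)
    else if PySem.Chars.isIn [':'] item then
      match PySem.Chars.splitOnMax item [':'] 1 with
      | fname :: fdir :: _ => (':' :: fdir, fname)
      | _ => ([], item)      -- unreachable: split on a present separator yields ≥ 2 parts
    else ([], item)
  let field := aCanonKey p.2
  if PySem.Chars.startswith p.1 ['-'] then p.1 ++ field else field ++ p.1

def canonicalize_sort_value_py (sort_value : String) : String :=
  String.ofList (PySem.Chars.join [','] ((aSplit sort_value.toList).map aItem))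

-- ===== PORT B =====

-- _take_token: while loop on the suffix string; quoted spans skipped via s.find(s[0], 1).
-- The Nat argument is FUEL, a pure totality guard: it is never exhausted when it starts
-- at the suffix length, since every iteration consumes at least one character.
def bTakeTok : Nat → List Char → List Char × List Char
  | _, [] => ([], [])
  | 0, s => ([], s)
  | fuel + 1, c :: r =>
      if c = ',' then ([], c :: r)
      else if c = '\'' ∨ c = '"' then
        let e := PySem.Chars.findFrom (c :: r) [c] 1
        -- e ≥ 1 whenever e ≠ -1, so (e+1).toNat is exactly Python's end+1
        let cut := if e = -1 then (c :: r).length else (e + 1).toNat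
        let p := bTakeTok fuel ((c :: r).drop cut)
        ((c :: r).take cut ++ p.1, p.2)
      else
        let p := bTakeTok fuel r
        (c :: p.1, p.2)

-- field[len("host_venue."):] = drop; str.startswith, str.strip via PySem
def bFix (field : List Char) : List Char :=
  let f := PySem.Chars.strip field
  if PySem.Chars.startswith f "host_venue.".toList then
    "primary_location.source.".toList ++ f.drop ("host_venue.".toList.length)
  else f

-- str.partition(":"), ported by hand (no PySem primitive): exact for this 1-char separator
def bPartition : List Char → List Char × List Char × List Char
  | [] => ([], [], [])
  | c :: r =>
      if c = ':' then ([], [':'], r)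
      else
        let p := bPartition r
        (c :: p.1, p.2.1, p.2.2)

def bItem (item : List Char) : List Char :=
  if PySem.Chars.startswith item ['-'] then '-' :: bFix (item.drop 1)
  else
    let p := bPartition item
    bFix p.1 ++ p.2.1 ++ p.2.2

-- the main while loop of B's _canonicalize_sort_value (Nat = fuel, a totality guard
-- never exhausted when started at the string length)
def bLoop : Nat → List Char → List (List Char)
  | _, [] => []
  | 0, _ => []
  | fuel + 1, c :: r =>
      if c = ',' then bLoop fuel r
      else
        let p := bTakeTok (c :: r).length (c :: r)
        let item := PySem.Chars.strip p.1
        if item = [] then bLoop fuel p.2 else bItem item :: bLoop fuel p.2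

def canonicalize_sort_value_py_alt (sort_value : String) : String :=
  String.ofList (PySem.Chars.join [','] (bLoop sort_value.toList.length sort_value.toList))

-- ===== PRECONDITION & SPEC =====
def Spec_canonicalize_sort_value_py (sort_value : String) (out : String) : Prop := out = canonicalize_sort_value_py_alt sort_value
instance (sort_value : String) (out : String) : Decidable (Spec_canonicalize_sort_value_py sort_value out) := by unfold Spec_canonicalize_sort_value_py; infer_instance

-- ===== CLAIM (what is proved, stated in full; the proofs are below) =====
def Claim_equal_canonicalize_sort_value_py : Prop := ∀ (sort_value : String), Dom_canonicalize_sort_value_py sort_value → Spec_canonicalize_sort_value_py sort_value (canonicalize_sort_value_py sort_value)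

-- ===== LEMMAS AND PROOFS =====

-- Python's str.find characterised (used to reason about bTakeTok's quote jumps)
theorem bFindGo (q : Char) : ∀ (r : List Char) (k : Nat),
    PySem.Chars.find.go [q] r k =
      if q ∈ r then ((k : Int) + ((r.takeWhile (· ≠ q)).length : Int)) else -1 := by
  intro r
  induction r with
  | nil => intro k; simp [PySem.Chars.find.go]
  | cons c t ih =>
    intro k
    by_cases hc : q = c
    · subst hc; simp [PySem.Chars.find.go, List.isPrefixOf]
    · rw [PySem.Chars.find.go]
      have hp : List.isPrefixOf [q] (c :: t) = false := by
        simp [List.isPrefixOf]; exact hc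
      rw [hp]
      simp only [Bool.false_eq_true, if_false, ih (k + 1)]
      by_cases hm : q ∈ t
      · simp [hm, List.mem_cons, hc, Ne.symm hc]
        omega
      · simp [hm, List.mem_cons, hc]

theorem bFindFromOne (c : Char) (r : List Char) :
    PySem.Chars.findFrom (c :: r) [c] 1 =
      if c ∈ r then (1 + ((r.takeWhile (· ≠ c)).length : Int)) else -1 := by
  have h1 : ((1 : Nat) : Int) = (1 : Int) := by norm_num
  have h := PySem.Chars.findFrom_natCast (c :: r) [c] 1 (by simp)
  rw [h1] at h
  rw [h]
  have hd : List.drop 1 (c :: r) = r := by simp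
  rw [hd]
  have hfind : PySem.Chars.find r [c] =
      if c ∈ r then (((r.takeWhile (· ≠ c)).length : Int)) else -1 := by
    rw [PySem.Chars.find, bFindGo]
    by_cases hm : c ∈ r <;> simp [hm]
  rw [hfind]
  by_cases hm : c ∈ r
  · rw [if_pos hm, if_neg (by omega : ¬ (((r.takeWhile (· ≠ c)).length : Int) = -1)), if_pos hm]
  · simp [hm]

theorem bTakeTok_snd_le : ∀ (fuel : Nat) (s : List Char), (bTakeTok fuel s).2.length ≤ s.length := by
  intro fuel
  induction fuel with
  | zero => intro s; cases s <;> simp [bTakeTok]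
  | succ n ih =>
    intro s
    cases s with
    | nil => simp [bTakeTok]
    | cons c r =>
      by_cases h1 : c = ','
      · subst h1; simp [bTakeTok]
      · by_cases h2 : c = '\'' ∨ c = '"'
        · simp only [bTakeTok, if_neg h1, if_pos h2]
          exact le_trans (ih _) (by simp)
        · simp only [bTakeTok, if_neg h1, if_neg h2]
          exact le_trans (ih r) (by simp)

theorem bTakeTok_snd_lt (fuel : Nat) (c : Char) (r : List Char) (h : ¬ c = ',') :
    (bTakeTok (fuel + 1) (c :: r)).2.length < (c :: r).length := by
  by_cases h2 : c = '\'' ∨ c = '"'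
  · simp only [bTakeTok, if_neg h, if_pos h2]
    refine lt_of_le_of_lt (bTakeTok_snd_le _ _) ?_
    simp only [List.length_drop]
    rw [bFindFromOne c r]
    have htw := (List.takeWhile_prefix (l := r) (· ≠ c)).length_le
    by_cases hm : c ∈ r
    · rw [if_pos hm, if_neg (by omega : ¬ ((1 : Int) + ((r.takeWhile (· ≠ c)).length : Int) = -1))]
      simp only [List.length_cons]
      omega
    · simp [hm]
  · simp only [bTakeTok, if_neg h, if_neg h2]
    exact lt_of_le_of_lt (bTakeTok_snd_le fuel r) (by simp)

-- prepend a prefix onto the first raw segment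
def preC (p : List Char) : List (List Char) → List (List Char)
  | [] => [p]
  | x :: xs => (p ++ x) :: xs

-- the raw top-level comma-separated segments of s, starting in quote state q
def segs : Option Char → List Char → List (List Char)
  | _, [] => [[]]
  | q, c :: r =>
      if c = '\'' ∨ c = '"' then
        preC [c] (segs (if q = some c then none else if q = none then some c else q) r)
      else if c = ',' ∧ q = none then [] :: segs none r
      else preC [c] (segs q r)

-- strip every raw segment and drop the empty ones
def filterStrips (l : List (List Char)) : List (List Char) :=
  (l.map PySem.Chars.strip).filter (· ≠ [])

theorem preC_ne_nil (p : List Char) (l : List (List Char)) : preC p l ≠ [] := by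
  cases l <;> simp [preC]

theorem segs_ne_nil (q : Option Char) (s : List Char) : segs q s ≠ [] := by
  cases s with
  | nil => simp [segs]
  | cons c r => unfold segs; split_ifs <;> simp [preC_ne_nil]

theorem preC_preC (a b : List Char) (l : List (List Char)) :
    preC a (preC b l) = preC (a ++ b) l := by
  cases l <;> simp [preC]

theorem preC_nil (l : List (List Char)) (h : l ≠ []) : preC [] l = l := by
  cases l with
  | nil => exact absurd rfl h
  | cons x xs => simp [preC]

theorem strip_nil : PySem.Chars.strip [] = [] := rfl

theorem filterStrips_cons (x : List Char) (xs : List (List Char)) :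
    filterStrips (x :: xs) =
      (if PySem.Chars.strip x = [] then [] else [PySem.Chars.strip x]) ++ filterStrips xs := by
  by_cases h : PySem.Chars.strip x = [] <;> simp [filterStrips, h]

-- ===== A side: the state machine computes filterStrips ∘ segs =====

theorem aLoop_eq : ∀ (s : List Char) (parts : List (List Char)) (cur : List Char) (q : Option Char),
    aLoop parts cur q s = parts ++ filterStrips (preC cur (segs q s)) := by
  intro s
  induction s with
  | nil =>
    intro parts cur q
    by_cases h : PySem.Chars.strip cur = [] <;>
      simp [aLoop, segs, preC, filterStrips, List.filter, h]
  | cons c r ih =>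
    intro parts cur q
    unfold aLoop segs
    by_cases h1 : c = '\'' ∨ c = '"'
    · rw [if_pos h1, if_pos h1, ih, preC_preC]
    · rw [if_neg h1, if_neg h1]
      by_cases h2 : c = ',' ∧ q = none
      · rw [if_pos h2, if_pos h2, ih, preC_nil _ (segs_ne_nil none r)]
        have hc : preC cur ([] :: segs none r) = cur :: segs none r := by simp [preC]
        rw [hc, filterStrips_cons]
        by_cases h : PySem.Chars.strip cur = [] <;> simp [h]
      · rw [if_neg h2, if_neg h2, ih, preC_preC]

theorem aSplit_eq (s : List Char) : aSplit s = filterStrips (segs none s) := by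
  by_cases h : s = []
  · simp [aSplit, h, segs, filterStrips, List.filter, strip_nil]
  · rw [aSplit, if_neg h, aLoop_eq, preC_nil _ (segs_ne_nil none s)]
    simp

-- ===== B side: the find-jump tokenizer computes the same segments =====

theorem segs_some (c : Char) (hc : c = '\'' ∨ c = '"') : ∀ (r : List Char),
    segs (some c) r =
      if c ∈ r then
        preC (r.takeWhile (· ≠ c) ++ [c]) (segs none ((r.dropWhile (· ≠ c)).tail))
      else [r] := by
  intro r
  induction r with
  | nil => simp [segs]
  | cons d r' ih =>
    by_cases hd : d = c
    · subst hd
      have hstep : segs (some d) (d :: r') = preC [d] (segs none r') := by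
        conv_lhs => unfold segs
        rw [if_pos hc]
        norm_num
      rw [hstep, if_pos (List.mem_cons_self)]
      simp
    · have hstep : segs (some c) (d :: r') = preC [d] (segs (some c) r') := by
        conv_lhs => unfold segs
        by_cases hq : d = '\'' ∨ d = '"'
        · rw [if_pos hq]
          have h3 : (if (some c : Option Char) = some d then none
                  else if (some c : Option Char) = none then some d else some c) = some c := by
            simp [Ne.symm hd]
          rw [h3]
        · rw [if_neg hq, if_neg (by simp : ¬ (d = ',' ∧ (some c : Option Char) = none))]
      rw [hstep, ih]
      by_cases hm : c ∈ r'
      · rw [if_pos hm, if_pos (by simp [hm]), preC_preC]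
        simp [hd]
      · rw [if_neg hm, if_neg (by simp [hm, Ne.symm hd])]
        simp [preC]

theorem mem_decomp (c : Char) : ∀ (r : List Char), c ∈ r →
    r = r.takeWhile (· ≠ c) ++ c :: (r.dropWhile (· ≠ c)).tail := by
  intro r
  induction r with
  | nil => intro h; simp at h
  | cons d t ih =>
    intro hm
    by_cases hd : d = c
    · subst hd; simp
    · have hm' : c ∈ t := by
        rcases List.mem_cons.mp hm with h | h
        · exact absurd h.symm hd
        · exact h
      have := ih hm'
      simp only [List.takeWhile_cons, List.dropWhile_cons]
      have hne : (decide (d ≠ c)) = true := by simp [hd]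
      rw [hne]
      simp only [if_true]
      rw [List.cons_append]
      exact congrArg (d :: ·) this

theorem bTakeTok_segs : ∀ (fuel : Nat) (s : List Char), s.length ≤ fuel →
    segs none s = preC (bTakeTok fuel s).1 (segs none (bTakeTok fuel s).2) := by
  intro fuel
  induction fuel with
  | zero =>
    intro s hs
    have hnil : s = [] := List.eq_nil_of_length_eq_zero (Nat.le_zero.mp hs)
    subst hnil
    simp [bTakeTok, segs, preC]
  | succ n ihn =>
    intro s hs
    cases s with
    | nil => simp [bTakeTok, segs, preC]
    | cons c r =>
      by_cases h1 : c = ','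
      · subst h1
        simp only [bTakeTok]
        exact (preC_nil _ (segs_ne_nil none _)).symm
      · by_cases h2 : c = '\'' ∨ c = '"'
        · have hsegs : segs none (c :: r) = preC [c] (segs (some c) r) := by
            conv_lhs => unfold segs
            rw [if_pos h2]
            simp
          simp only [bTakeTok, if_neg h1, if_pos h2]
          rw [hsegs, segs_some c h2 r, bFindFromOne c r]
          by_cases hm : c ∈ r
          · rw [if_pos hm, if_pos hm,
              if_neg (by omega : ¬ ((1 : Int) + ((r.takeWhile (· ≠ c)).length : Int) = -1))]
            have hcut : ((1 : Int) + ((r.takeWhile (· ≠ c)).length : Int) + 1).toNat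
                = (r.takeWhile (· ≠ c)).length + 2 := by omega
            rw [hcut]
            have hdec := mem_decomp c r hm
            have hsplit : (c :: r) = (c :: r.takeWhile (· ≠ c)) ++ c :: (r.dropWhile (· ≠ c)).tail := by
              rw [List.cons_append]; exact congrArg (c :: ·) hdec
            have htake : List.take ((r.takeWhile (· ≠ c)).length + 2) (c :: r)
                = c :: (r.takeWhile (· ≠ c) ++ [c]) := by
              conv_lhs => rw [hsplit]
              rw [List.take_append]
              simp
            have hdrop : List.drop ((r.takeWhile (· ≠ c)).length + 2) (c :: r)
                = (r.dropWhile (· ≠ c)).tail := by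
              conv_lhs => rw [hsplit]
              rw [List.drop_append]
              simp
            rw [htake, hdrop]
            have hlen : ((r.dropWhile (· ≠ c)).tail).length ≤ n := by
              have h1' := List.length_tail (l := r.dropWhile (· ≠ c))
              have h2' := List.length_dropWhile_le (p := (· ≠ c)) (l := r)
              simp only [List.length_cons] at hs
              omega
            rw [ihn _ hlen, preC_preC, preC_preC]
            simp
          · rw [if_neg hm, if_neg hm, if_pos rfl]
            simp only [List.drop_length, List.take_length]
            simp [bTakeTok, segs, preC]
        · have hsegs : segs none (c :: r) = preC [c] (segs none r) := by
            conv_lhs => unfold segs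
            rw [if_neg h2, if_neg (by simp [h1] : ¬ (c = ',' ∧ (none : Option Char) = none))]
          simp only [bTakeTok, if_neg h1, if_neg h2]
          have hlen : r.length ≤ n := by simp only [List.length_cons] at hs; omega
          rw [hsegs, ihn r hlen, preC_preC]
          simp

theorem bCut_pos (c : Char) (r : List Char) :
    1 ≤ (if PySem.Chars.findFrom (c :: r) [c] 1 = -1 then (c :: r).length
         else (PySem.Chars.findFrom (c :: r) [c] 1 + 1).toNat) := by
  rw [bFindFromOne c r]
  by_cases hm : c ∈ r
  · rw [if_pos hm, if_neg (by omega : ¬ ((1 : Int) + ((r.takeWhile (· ≠ c)).length : Int) = -1))]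
    omega
  · simp [hm]

theorem bTakeTok_stop : ∀ (fuel : Nat) (s : List Char), s.length ≤ fuel →
    (bTakeTok fuel s).2 = [] ∨ ∃ r, (bTakeTok fuel s).2 = ',' :: r := by
  intro fuel
  induction fuel with
  | zero =>
    intro s hs
    have hnil : s = [] := List.eq_nil_of_length_eq_zero (Nat.le_zero.mp hs)
    subst hnil
    simp [bTakeTok]
  | succ n ihn =>
    intro s hs
    cases s with
    | nil => simp [bTakeTok]
    | cons c r =>
      by_cases h1 : c = ','
      · subst h1
        right
        exact ⟨r, by simp [bTakeTok]⟩
      · by_cases h2 : c = '\'' ∨ c = '"'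
        · simp only [bTakeTok, if_neg h1, if_pos h2]
          refine ihn _ ?_
          have hcut := bCut_pos c r
          simp only [List.length_drop]
          simp only [List.length_cons] at hs hcut ⊢
          omega
        · simp only [bTakeTok, if_neg h1, if_neg h2]
          refine ihn r ?_
          simp only [List.length_cons] at hs
          omega

theorem segs_comma (r : List Char) : segs none (',' :: r) = [] :: segs none r := by
  conv_lhs => unfold segs
  rw [if_neg (by decide : ¬ (',' = '\'' ∨ ',' = '"')), if_pos ⟨rfl, rfl⟩]

theorem filterStrips_nil : filterStrips [] = [] := rfl

theorem bLoop_eq : ∀ (fuel : Nat) (s : List Char), s.length ≤ fuel →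
    bLoop fuel s = (filterStrips (segs none s)).map bItem := by
  intro fuel
  induction fuel with
  | zero =>
    intro s hs
    have hnil : s = [] := List.eq_nil_of_length_eq_zero (Nat.le_zero.mp hs)
    subst hnil
    simp [bLoop, segs, filterStrips, strip_nil]
  | succ n ihn =>
    intro s hs
    cases s with
    | nil => simp [bLoop, segs, filterStrips, strip_nil]
    | cons c r =>
      by_cases h1 : c = ','
      · subst h1
        have hlen : r.length ≤ n := by simp only [List.length_cons] at hs; omega
        rw [bLoop, segs_comma, filterStrips_cons, if_pos strip_nil]
        simpa using ihn r hlen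
      · have hlt : (bTakeTok (c :: r).length (c :: r)).2.length < (c :: r).length := by
          simpa using bTakeTok_snd_lt r.length c r h1
        have hle2 : (bTakeTok (c :: r).length (c :: r)).2.length ≤ n := by
          simp only [List.length_cons] at hs hlt ⊢
          omega
        have ih := ihn _ hle2
        rw [bLoop, if_neg h1, bTakeTok_segs (c :: r).length (c :: r) le_rfl]
        show (if PySem.Chars.strip (bTakeTok (c :: r).length (c :: r)).1 = []
              then bLoop n (bTakeTok (c :: r).length (c :: r)).2
              else bItem (PySem.Chars.strip (bTakeTok (c :: r).length (c :: r)).1)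
                :: bLoop n (bTakeTok (c :: r).length (c :: r)).2)
            = List.map bItem (filterStrips (preC (bTakeTok (c :: r).length (c :: r)).1
                (segs none (bTakeTok (c :: r).length (c :: r)).2)))
        rcases bTakeTok_stop (c :: r).length (c :: r) le_rfl with hstop | ⟨r2, hstop⟩
        · rw [hstop] at ih ⊢
          by_cases hstrip : PySem.Chars.strip (bTakeTok (r.length + 1) (c :: r)).1 = [] <;>
            simp [ih, filterStrips_cons, filterStrips_nil, hstrip, strip_nil, segs, preC]
        · rw [hstop, segs_comma] at ih ⊢
          rw [filterStrips_cons, if_pos strip_nil] at ih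
          simp only [List.nil_append] at ih
          have hpre : preC (bTakeTok (c :: r).length (c :: r)).1 ([] :: segs none r2)
              = ((bTakeTok (c :: r).length (c :: r)).1 ++ []) :: segs none r2 := rfl
          rw [hpre, filterStrips_cons]
          by_cases hstrip : PySem.Chars.strip (bTakeTok (r.length + 1) (c :: r)).1 = [] <;>
            simp only [List.append_nil, List.length_cons] at hstrip ih ⊢ <;>
            simp [hstrip, ih]

-- ===== the per-item transforms agree =====

theorem aReplace1_of_prefix (old new : List Char) : ∀ (l : List Char),
    PySem.Chars.startswith l old = true → aReplace1 old new l = new ++ l.drop old.length := by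
  intro l h
  cases l <;> simp [aReplace1, h]

theorem canonKey_eq_fix (k : List Char) : aCanonKey k = bFix k := by
  unfold aCanonKey bFix
  by_cases h : PySem.Chars.startswith (PySem.Chars.strip k) "host_venue.".toList = true
  · rw [if_pos h, if_pos h, aReplace1_of_prefix _ _ _ h]
  · rw [if_neg h, if_neg h]

theorem bPartition_spec (it : List Char) :
    bPartition it =
      if ':' ∈ it then (it.takeWhile (· ≠ ':'), [':'], (it.dropWhile (· ≠ ':')).tail)
      else (it, [], []) := by
  induction it with
  | nil => simp [bPartition]
  | cons c r ih =>
    by_cases hc : c = ':'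
    · subst hc
      simp [bPartition]
    · rw [bPartition, if_neg hc, ih]
      by_cases hm : ':' ∈ r
      · rw [if_pos hm, if_pos (by simp [hm])]
        simp [hc]
      · rw [if_neg hm, if_neg (by
          intro hmem
          rcases List.mem_cons.mp hmem with h | h
          · exact hc h.symm
          · exact hm h)]

theorem splitOnMax_go_zero (fuel : Nat) (l cur : List Char) (acc : List (List Char)) :
    PySem.Chars.splitOnMax.go [':'] fuel 0 l cur acc = ((cur.reverse ++ l) :: acc).reverse := by
  cases fuel with
  | zero => simp [PySem.Chars.splitOnMax.go]
  | succ f => cases l <;> simp [PySem.Chars.splitOnMax.go]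

theorem splitOnMax_go_one : ∀ (l : List Char) (fuel : Nat) (cur : List Char) (acc : List (List Char)),
    l.length ≤ fuel →
    PySem.Chars.splitOnMax.go [':'] (fuel + 1) 1 l cur acc =
      if ':' ∈ l then
        acc.reverse ++ [cur.reverse ++ l.takeWhile (· ≠ ':'), (l.dropWhile (· ≠ ':')).tail]
      else acc.reverse ++ [cur.reverse ++ l] := by
  intro l
  induction l with
  | nil =>
    intro fuel cur acc _
    simp [PySem.Chars.splitOnMax.go]
  | cons c rest ih =>
    intro fuel cur acc h
    simp only [List.length_cons] at h
    by_cases hc : c = ':'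
    · subst hc
      rw [PySem.Chars.splitOnMax.go]
      simp only [if_neg (by omega : ¬ (1 = 0))]
      rw [if_pos (by simp [List.isPrefixOf] : List.isPrefixOf [':'] (':' :: rest) = true)]
      rw [splitOnMax_go_zero]
      simp
    · obtain ⟨f', rfl⟩ : ∃ f', fuel = f' + 1 := ⟨fuel - 1, by omega⟩
      rw [PySem.Chars.splitOnMax.go]
      simp only [if_neg (by omega : ¬ (1 = 0))]
      rw [if_neg (by
        simp only [List.isPrefixOf, Bool.and_eq_true, beq_iff_eq]
        intro hx
        exact hc hx.1.symm)]
      rw [ih f' (c :: cur) acc (by omega)]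
      by_cases hm : ':' ∈ rest
      · rw [if_pos hm, if_pos (by simp [hm])]
        simp [hc, List.append_assoc]
      · rw [if_neg hm, if_neg (by
          intro hmem
          rcases List.mem_cons.mp hmem with h | h
          · exact hc h.symm
          · exact hm h)]
        simp [List.append_assoc]

theorem splitOnMax_colon (it : List Char) (h : ':' ∈ it) :
    PySem.Chars.splitOnMax it [':'] 1 = [it.takeWhile (· ≠ ':'), (it.dropWhile (· ≠ ':')).tail] := by
  rw [PySem.Chars.splitOnMax, if_neg (by omega : ¬ ((1 : Int) < 0))]
  have h1 : ((1 : Int)).toNat = 1 := rfl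
  rw [h1, splitOnMax_go_one it it.length [] [] le_rfl, if_pos h]
  simp

theorem isIn_colon (it : List Char) : PySem.Chars.isIn [':'] it = true ↔ ':' ∈ it := by
  rw [PySem.Chars.isIn_iff_infix]
  exact List.singleton_infix_iff ':' it

theorem item_eq (it : List Char) : aItem it = bItem it := by
  unfold aItem bItem
  by_cases hminus : PySem.Chars.startswith it ['-'] = true
  · rw [if_pos hminus, if_pos hminus]
    simp [canonKey_eq_fix, (by decide : PySem.Chars.startswith ['-'] ['-'] = true)]
  · rw [if_neg hminus, if_neg hminus]
    by_cases hin : PySem.Chars.isIn [':'] it = true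
    · have hmem : ':' ∈ it := (isIn_colon it).mp hin
      rw [if_pos hin, splitOnMax_colon it hmem, bPartition_spec, if_pos hmem]
      rw [if_neg (by simp [PySem.Chars.startswith, List.isPrefixOf] :
        ¬ (PySem.Chars.startswith (':' :: (it.dropWhile (· ≠ ':')).tail) ['-'] = true))]
      simp [canonKey_eq_fix]
    · have hmem : ':' ∉ it := fun h => hin ((isIn_colon it).mpr h)
      rw [if_neg hin, bPartition_spec, if_neg hmem]
      rw [if_neg (by simp [PySem.Chars.startswith, List.isPrefixOf] :
        ¬ (PySem.Chars.startswith ([] : List Char) ['-'] = true))]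
      simp [canonKey_eq_fix]

-- ===== VERDICT (by name: the statement is the Claim_ definition above) =====
theorem canonicalize_sort_value_py_spec : Claim_equal_canonicalize_sort_value_py := by
  intro s _
  unfold Spec_canonicalize_sort_value_py canonicalize_sort_value_py canonicalize_sort_value_py_alt
  rw [aSplit_eq, bLoop_eq _ _ le_rfl, List.map_congr_left (fun x _ => item_eq x)]
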